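-- pv_equiv track=rewrite | github.com/gabriellaec/desoft-analise-exercicios | backup/user_194/ch64_2019_04_04_22_01_42_389404.py | nome_usuario
-- ===== SOURCE A (Python) =====
-- def nome_usuario(string):
--     usuario = ''
--     email = str(string)
--     i = 0
--     while i < len(email):
--         if email[i] == '@':
--             usuario = email[:i]
--         i += 1
--     return usuario
-- ===== SOURCE B (Python) =====
-- def nome_usuario(string):
--     head, _sep, _tail = str(string).rpartition('@')
--     return head
-- ===== Notes on version B (the rewrite author's own statement) =====
-- stated objective: idiomatic
-- what changed: Replaces A's forward Python-level index loop (which re-slices the prefix at every separator it meets) with a single str.rpartition call that locates the last separator from the right and returns the head; no loop, no repeated slicing.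
import Mathlib
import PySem

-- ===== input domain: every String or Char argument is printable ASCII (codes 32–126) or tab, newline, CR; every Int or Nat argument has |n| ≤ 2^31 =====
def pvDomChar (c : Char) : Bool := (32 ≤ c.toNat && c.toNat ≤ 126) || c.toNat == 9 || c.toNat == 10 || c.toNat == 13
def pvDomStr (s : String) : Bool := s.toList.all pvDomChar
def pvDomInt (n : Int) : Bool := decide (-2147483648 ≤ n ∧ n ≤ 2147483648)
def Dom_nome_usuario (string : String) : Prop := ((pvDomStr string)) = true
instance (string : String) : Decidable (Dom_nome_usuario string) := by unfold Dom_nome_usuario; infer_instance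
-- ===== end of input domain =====

-- B replaces A's forward index loop with an rpartition('@')-style search from the right (idiomatic).

-- ===== PORT A =====
-- A: usuario = ''; for each index i of str(string), if char is '@' set usuario = email[:i].
-- str(string) is the identity on str; the while loop over i is the foldl over range(len(email)).
def nome_usuario (string : String) : String :=
  let email := string.toList
  String.ofList
    ((PySem.List.pyRange 0 (email.length : Int) 1).foldl
      (fun usuario i =>
        if PySem.List.pyGet? email i = some '@' then PySem.List.slice email none (some i)
        else usuario)
      [])

-- ===== PORT B =====
-- Hand port of str.rpartition('@') restricted to its head component, exact on all strings:
-- the prefix before the LAST '@' (found scanning from the right), and '' when '@' is absent.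
def nome_usuario_alt (string : String) : String :=
  let cs := string.toList
  if '@' ∈ cs then String.ofList ((cs.reverse.dropWhile (· ≠ '@')).tail).reverse
  else ""

-- ===== PRECONDITION & SPEC =====
def Spec_nome_usuario (string : String) (out : String) : Prop := out = nome_usuario_alt string
instance (string : String) (out : String) : Decidable (Spec_nome_usuario string out) := by unfold Spec_nome_usuario; infer_instance

-- ===== CLAIM (what is proved, stated in full; the proofs are below) =====
def Claim_equal_nome_usuario : Prop := ∀ (string : String), Dom_nome_usuario string → Spec_nome_usuario string (nome_usuario string)

-- ===== LEMMAS AND PROOFS =====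

-- Both sides, stated over the character list.
lemma nome_key (cs : List Char) :
    (PySem.List.pyRange 0 (cs.length : Int) 1).foldl
      (fun usuario i =>
        if PySem.List.pyGet? cs i = some '@' then PySem.List.slice cs none (some i)
        else usuario)
      []
    = (if '@' ∈ cs then ((cs.reverse.dropWhile (· ≠ '@')).tail).reverse else []) := by
  induction cs using List.reverseRecOn with
  | nil => simp [PySem.List.pyRange]
  | append_singleton ds c ih =>
    have hn : ((ds ++ [c]).length : Int) = (ds.length : Int) + 1 := by simp
    rw [hn, PySem.List.pyRange_one_append 0 (ds.length : Int) ((ds.length : Int) + 1)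
          (by positivity) (by omega)]
    have hlast : PySem.List.pyRange ((ds.length : Int)) ((ds.length : Int) + 1) = [(ds.length : Int)] := by
      rw [PySem.List.pyRange_one_cons (by omega)]
      simp [PySem.List.pyRange]
    rw [hlast, List.foldl_append]
    -- the first ds.length steps only look at ds
    have hcongr :
        (PySem.List.pyRange 0 (ds.length : Int) 1).foldl
          (fun usuario i =>
            if PySem.List.pyGet? (ds ++ [c]) i = some '@' then PySem.List.slice (ds ++ [c]) none (some i)
            else usuario) []
        = (PySem.List.pyRange 0 (ds.length : Int) 1).foldl
          (fun usuario i =>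
            if PySem.List.pyGet? ds i = some '@' then PySem.List.slice ds none (some i)
            else usuario) [] := by
      apply PySem.List.foldl_congr_mem
      intro acc x hx
      have hb := PySem.List.mem_pyRange_one.mp hx
      obtain ⟨k, rfl⟩ : ∃ k : Nat, x = (k : Int) := ⟨x.toNat, (Int.toNat_of_nonneg hb.1).symm⟩
      have hk : k < ds.length := by exact_mod_cast hb.2
      rw [PySem.List.pyGet?_natCast, PySem.List.pyGet?_natCast,
          PySem.List.slice_to_natCast, PySem.List.slice_to_natCast,
          List.getElem?_append_left hk, List.take_append_of_le_length (Nat.le_of_lt hk)]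
    rw [hcongr, ih]
    -- the final step looks at c
    have hget : PySem.List.pyGet? (ds ++ [c]) (ds.length : Int) = some c := by
      rw [PySem.List.pyGet?_natCast]
      simp
    have hslice : PySem.List.slice (ds ++ [c]) none (some (ds.length : Int)) = ds := by
      rw [PySem.List.slice_to_natCast]; simp
    by_cases hc : c = '@'
    · subst hc
      simp [hget, hslice]
    · have hgetne : ¬ (PySem.List.pyGet? (ds ++ [c]) (ds.length : Int) = some '@') := by
        rw [hget]; simpa using hc
      simp only [List.foldl_cons, List.foldl_nil, if_neg hgetne]
      have hmem : ('@' ∈ ds ++ [c]) ↔ ('@' ∈ ds) := by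
        simp [List.mem_append, (Ne.symm hc)]
      have hdw : ((ds ++ [c]).reverse).dropWhile (· ≠ '@') = ds.reverse.dropWhile (· ≠ '@') := by
        simp [hc]
      rw [hdw]
      by_cases hm : '@' ∈ ds
      · simp [hmem, hm]
      · simp [hmem, hm]

-- ===== VERDICT (by name: the statement is the Claim_ definition above) =====
theorem nome_usuario_spec : Claim_equal_nome_usuario := by
  intro s _
  unfold Spec_nome_usuario nome_usuario nome_usuario_alt
  simp only
  rw [nome_key]
  by_cases h : '@' ∈ s.toList <;> simp [h]
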